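-- pv_equiv track=rewrite | github.com/Baryonic/free_llm_benchmark | free_llm_benchmark.py | check_repeated_content
-- ===== SOURCE A (Python) =====
-- def check_repeated_content(content, threshold=200):
--     """
--     Check if content contains the same message repeated multiple times.
--     Returns True if content appears to be repeated, False otherwise.
--     """
--     # Split content into words
--     words = content.split()
--     if not words:
--         return False
--
--     # Count occurrences of each word
--     word_counts = {}
--     for word in words:
--         word_counts[word] = word_counts.get(word, 0) + 1
--
--     # Check if any word appears too many times
--     for count in word_counts.values():
--         if count > threshold:
--             return True
--
--     return False
-- ===== SOURCE B (Python) =====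
-- def check_repeated_content(content, threshold=200):
--     run = 0
--     prev = None
--     for w in sorted(content.split()):
--         run = run + 1 if w == prev else 1
--         prev = w
--         if run > threshold:
--             return True
--     return False
-- ===== Notes on version B (the rewrite author's own statement) =====
-- stated objective: alternative
-- what changed: Replaces the dict-of-counts pass plus a second pass over the values by sorting the words and scanning adjacent runs with a running counter, returning early as soon as a run exceeds the threshold.
import Mathlib
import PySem

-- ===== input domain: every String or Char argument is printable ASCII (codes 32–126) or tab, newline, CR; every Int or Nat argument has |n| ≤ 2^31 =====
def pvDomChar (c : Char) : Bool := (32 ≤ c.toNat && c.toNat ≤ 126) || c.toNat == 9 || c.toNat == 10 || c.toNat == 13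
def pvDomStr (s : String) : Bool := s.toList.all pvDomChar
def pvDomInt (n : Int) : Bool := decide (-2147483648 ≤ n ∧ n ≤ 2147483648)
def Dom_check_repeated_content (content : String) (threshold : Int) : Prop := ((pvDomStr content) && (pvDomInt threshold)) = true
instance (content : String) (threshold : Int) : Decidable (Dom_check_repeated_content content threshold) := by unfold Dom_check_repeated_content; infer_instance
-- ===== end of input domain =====

-- B replaces A's dict-of-counts plus value scan by sort-then-adjacent-run counting (alternative algorithm, same result).

-- ===== PORT A =====
def check_repeated_content (content : String) (threshold : Int) : Bool :=
  let words := PySem.Str.split₀ content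
  if words = [] then false
  else
    let word_counts := words.foldl (fun d w => d.insert w (d.getD w 0 + 1)) PySem.Dict.empty
    -- 'for count in values: if count > threshold: return True' then 'return False' = any
    word_counts.values.any (fun c => c > threshold)

-- ===== PORT B =====
-- the for-loop of Source B with early return, over the sorted word list
def pvRunScan (threshold : Int) (prev : Option String) (run : Int) : List String → Bool
  | [] => false
  | w :: ws =>
    let run' := if some w = prev then run + 1 else 1
    if run' > threshold then true else pvRunScan threshold (some w) run' ws

def check_repeated_content_alt (content : String) (threshold : Int) : Bool :=
  pvRunScan threshold none 0 (PySem.List.sorted (PySem.Str.split₀ content) (fun x => x) false)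

-- ===== PRECONDITION & SPEC =====
def Spec_check_repeated_content (content : String) (threshold : Int) (out : Bool) : Prop := out = check_repeated_content_alt content threshold
instance (content : String) (threshold : Int) (out : Bool) : Decidable (Spec_check_repeated_content content threshold out) := by unfold Spec_check_repeated_content; infer_instance

-- ===== CLAIM (what is proved, stated in full; the proofs are below) =====
def Claim_equal_check_repeated_content : Prop := ∀ (content : String) (threshold : Int), Dom_check_repeated_content content threshold → Spec_check_repeated_content content threshold (check_repeated_content content threshold)

-- ===== LEMMAS AND PROOFS =====

-- the run scan on a sorted list detects exactly a count above the threshold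
theorem pvRunScan_iff (t : Int) (l : List String) (prev : Option String) (run : Int)
    (hsort : l.Pairwise (· ≤ ·))
    (hlb : ∀ x ∈ l, ∀ p, prev = some p → p ≤ x)
    (hrun : run ≤ t) :
    (pvRunScan t prev run l = true) ↔
      ((∃ p, prev = some p ∧ run + (l.count p : Int) > t) ∨
       (∃ w ∈ l, (∀ p, prev = some p → w ≠ p) ∧ ((l.count w : Int) > t))) := by
  induction l generalizing prev run with
  | nil =>
    rw [show pvRunScan t prev run [] = false from rfl]
    simp only [Bool.false_eq_true, false_iff]
    rintro (⟨p, hp, hc⟩ | ⟨x, hx, _⟩)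
    · simp only [List.count_nil, Nat.cast_zero] at hc
      omega
    · exact absurd hx List.not_mem_nil
  | cons w ws ih =>
    have hws : ws.Pairwise (· ≤ ·) := hsort.tail
    have hwle : ∀ x ∈ ws, w ≤ x := by
      intro x hx; exact (List.pairwise_cons.mp hsort).1 x hx
    by_cases hpw : some w = prev
    · -- same word as previous: run grows
      subst hpw
      by_cases hgt : run + 1 > t
      · have hL : pvRunScan t (some w) run (w :: ws) = true := by
          simp [pvRunScan, hgt]
        rw [hL]
        constructor
        · intro _
          refine Or.inl ⟨w, rfl, ?_⟩
          rw [List.count_cons_self]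
          push_cast
          omega
        · intro _; rfl
      · rw [show pvRunScan t (some w) run (w :: ws)
              = pvRunScan t (some w) (run + 1) ws by
            simp [pvRunScan, hgt]]
        rw [ih (some w) (run + 1) hws
              (by intro x hx p hp; cases hp; exact hwle x hx) (by omega)]
        constructor
        · rintro (⟨p, hp, hc⟩ | ⟨v, hv, hne, hc⟩)
          · cases hp
            refine Or.inl ⟨w, rfl, ?_⟩
            rw [List.count_cons_self]
            push_cast
            omega
          · refine Or.inr ⟨v, List.mem_cons_of_mem _ hv, hne, ?_⟩
            have hvw : v ≠ w := hne w rfl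
            simpa [List.count_cons, Ne.symm hvw] using hc
        · rintro (⟨p, hp, hc⟩ | ⟨v, hv, hne, hc⟩)
          · cases hp
            refine Or.inl ⟨w, rfl, ?_⟩
            rw [List.count_cons_self] at hc
            push_cast at hc
            omega
          · have hvw : v ≠ w := hne w rfl
            have hvws : v ∈ ws := by
              rcases List.mem_cons.mp hv with h | h
              · exact absurd h hvw
              · exact h
            refine Or.inr ⟨v, hvws, hne, ?_⟩
            simpa [List.count_cons, Ne.symm hvw] using hc
    · -- new word: run resets to 1
      -- previous word (if any) is strictly below everything remaining
      have hprev0 : ∀ p, prev = some p → ∀ x, x ∈ w :: ws → p ≠ x := by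
        intro p hp x hx
        have hpw' : p ≠ w := by
          intro h; exact hpw (by rw [hp, h])
        have hpltw : p < w := lt_of_le_of_ne (hlb w List.mem_cons_self p hp) hpw'
        rcases List.mem_cons.mp hx with h | h
        · subst h; exact ne_of_lt hpltw
        · exact ne_of_lt (lt_of_lt_of_le hpltw (hwle x h))
      have hcntp : ∀ p, prev = some p → (w :: ws).count p = 0 := by
        intro p hp
        rw [List.count_eq_zero]
        intro hmem; exact hprev0 p hp p hmem rfl
      by_cases hgt : (1 : Int) > t
      · have hL : pvRunScan t prev run (w :: ws) = true := by
          simp [pvRunScan, hpw, hgt]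
        rw [hL]
        constructor
        · intro _
          refine Or.inr ⟨w, List.mem_cons_self, ?_, ?_⟩
          · intro p hp h; exact hprev0 p hp w List.mem_cons_self (h ▸ rfl)
          · rw [List.count_cons_self]
            push_cast
            omega
        · intro _; rfl
      · rw [show pvRunScan t prev run (w :: ws)
              = pvRunScan t (some w) 1 ws by
            simp [pvRunScan, hpw, hgt]]
        rw [ih (some w) 1 hws
              (by intro x hx p hp; cases hp; exact hwle x hx) (by omega)]
        constructor
        · rintro (⟨p, hp, hc⟩ | ⟨v, hv, hne, hc⟩)
          · cases hp
            refine Or.inr ⟨w, List.mem_cons_self, ?_, ?_⟩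
            · intro p hp h; exact hprev0 p hp w List.mem_cons_self (h ▸ rfl)
            · rw [List.count_cons_self]
              push_cast
              omega
          · have hvw : v ≠ w := hne w rfl
            refine Or.inr ⟨v, List.mem_cons_of_mem _ hv, ?_, ?_⟩
            · intro p hp h
              exact hprev0 p hp v (List.mem_cons_of_mem _ hv) (h ▸ rfl)
            · simpa [List.count_cons, Ne.symm hvw] using hc
        · rintro (⟨p, hp, hc⟩ | ⟨v, hv, _, hc⟩)
          · rw [hcntp p hp] at hc
            simp only [Nat.cast_zero] at hc
            omega
          · by_cases hvw : v = w
            · subst hvw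
              refine Or.inl ⟨v, rfl, ?_⟩
              rw [List.count_cons_self] at hc
              push_cast at hc
              omega
            · have hvws : v ∈ ws := by
                rcases List.mem_cons.mp hv with h | h
                · exact absurd h hvw
                · exact h
              refine Or.inr ⟨v, hvws, fun p hp => by cases hp; exact hvw, ?_⟩
              simpa [List.count_cons, Ne.symm hvw] using hc

-- B's result characterised: some word occurs more than threshold times
theorem alt_iff (content : String) (t : Int) :
    (check_repeated_content_alt content t = true) ↔
      ∃ w ∈ PySem.Str.split₀ content, ((PySem.Str.split₀ content).count w : Int) > t := by
  unfold check_repeated_content_alt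
  set words := PySem.Str.split₀ content with hw
  have hperm := PySem.List.sorted_perm words (fun x => x) false
  by_cases ht : 0 ≤ t
  swap
  · -- negative threshold: any word at all already exceeds it
    rcases hs : PySem.List.sorted words (fun x => x) false with _ | ⟨w, tl⟩
    · have hnil : words = [] := by
        have := hperm
        rw [hs] at this
        exact this.symm.eq_nil
      simp [pvRunScan, hnil]
    · have hL : pvRunScan t none 0 (w :: tl) = true := by
        simp [pvRunScan, show (1 : Int) > t by omega]
      rw [hL]
      refine ⟨fun _ => ?_, fun _ => rfl⟩
      have hwmem : w ∈ words := hperm.mem_iff.mp (hs ▸ List.mem_cons_self)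
      refine ⟨w, hwmem, ?_⟩
      have hpos : 0 < words.count w := List.count_pos_iff.mpr hwmem
      omega
  rw [pvRunScan_iff t _ none 0
        (PySem.List.sorted_pairwise words (fun x => x))
        (fun x _ p hp => nomatch hp) (by omega)]
  constructor
  · rintro (⟨p, hp, _⟩ | ⟨v, hv, _, hc⟩)
    · exact nomatch hp
    · exact ⟨v, hperm.mem_iff.mp hv, by rwa [hperm.count_eq v] at hc⟩
  · rintro ⟨v, hv, hc⟩
    refine Or.inr ⟨v, hperm.mem_iff.mpr hv, ?_, ?_⟩
    · intro p hp
      exact nomatch hp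
    · rwa [hperm.count_eq v]

-- A's result characterised the same way
theorem a_iff (content : String) (t : Int) :
    (check_repeated_content content t = true) ↔
      ∃ w ∈ PySem.Str.split₀ content, ((PySem.Str.split₀ content).count w : Int) > t := by
  unfold check_repeated_content
  set words := PySem.Str.split₀ content with hw
  by_cases hnil : words = []
  · simp [hnil]
  · simp only [if_neg hnil]
    rw [PySem.Dict.foldl_insert_getD_add_one_eq_counter]
    have hval : (PySem.Dict.counter words).values
        = (PySem.Set.ofList words).map (fun k => ((words.count k : Int))) := by
      calc (PySem.Dict.counter words).values
          = (PySem.Dict.counter words).items.map (·.2) := rfl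
        _ = ((PySem.Set.ofList words).map (fun k => (k, (words.count k : Int)))).map (·.2) := by
              rw [PySem.Dict.items_counter]
        _ = (PySem.Set.ofList words).map (fun k => ((words.count k : Int))) := by
              rw [List.map_map]; rfl
    rw [hval]
    simp only [List.any_map, List.any_eq_true, Function.comp]
    constructor
    · rintro ⟨v, hv, hc⟩
      exact ⟨v, (PySem.Set.mem_ofList _ _).mp hv, by simpa using hc⟩
    · rintro ⟨v, hv, hc⟩
      exact ⟨v, (PySem.Set.mem_ofList _ _).mpr hv, by simpa using hc⟩

-- ===== VERDICT (by name: the statement is the Claim_ definition above) =====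
theorem check_repeated_content_spec : Claim_equal_check_repeated_content := by
  intro content threshold _
  unfold Spec_check_repeated_content
  rcases hb : check_repeated_content_alt content threshold with _ | _
  · rcases ha : check_repeated_content content threshold with _ | _
    · rfl
    · exact absurd ((alt_iff content threshold).mpr ((a_iff content threshold).mp ha)) (by simp [hb])
  · exact (a_iff content threshold).mpr ((alt_iff content threshold).mp hb)
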